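-- pv_equiv track=rewrite | github.com/0x13enny/CSIE-Retriever | face_detection_auto_id.py | compute_face_sizes
-- ===== SOURCE A (Python) =====
-- def compute_face_sizes(face_locations, face_encodings):
--   face_sizes = []
--   max_face_size = 0
--   closest_face_idx = None
--
--   for i, face_encoding in enumerate(face_encodings):
--     top, right, bottom, left = face_locations[i]
--     size = (bottom-top) * (right-left)
--     face_sizes.append(size)
--
--     if size > max_face_size:
--       max_face_size = size
--       closest_face_idx = i
--
--   return face_sizes, closest_face_idx
-- ===== SOURCE B (Python) =====
-- def compute_face_sizes(face_locations, face_encodings):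
--   face_sizes = [(face_locations[i][2] - face_locations[i][0]) * (face_locations[i][1] - face_locations[i][3])
--                 for i in range(len(face_encodings))]
--   closest_face_idx = None
--   if face_sizes:
--     m = max(face_sizes)
--     if m > 0:
--       closest_face_idx = face_sizes.index(m)
--   return face_sizes, closest_face_idx
-- ===== Notes on version B (the rewrite author's own statement) =====
-- stated objective: simpler
-- what changed: A threads a running maximum and argmax through one append loop; B builds the sizes list with a comprehension and then, in a separate step, computes the winner with max() and .index() (None when empty or the maximum is not positive).
import Mathlib
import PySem

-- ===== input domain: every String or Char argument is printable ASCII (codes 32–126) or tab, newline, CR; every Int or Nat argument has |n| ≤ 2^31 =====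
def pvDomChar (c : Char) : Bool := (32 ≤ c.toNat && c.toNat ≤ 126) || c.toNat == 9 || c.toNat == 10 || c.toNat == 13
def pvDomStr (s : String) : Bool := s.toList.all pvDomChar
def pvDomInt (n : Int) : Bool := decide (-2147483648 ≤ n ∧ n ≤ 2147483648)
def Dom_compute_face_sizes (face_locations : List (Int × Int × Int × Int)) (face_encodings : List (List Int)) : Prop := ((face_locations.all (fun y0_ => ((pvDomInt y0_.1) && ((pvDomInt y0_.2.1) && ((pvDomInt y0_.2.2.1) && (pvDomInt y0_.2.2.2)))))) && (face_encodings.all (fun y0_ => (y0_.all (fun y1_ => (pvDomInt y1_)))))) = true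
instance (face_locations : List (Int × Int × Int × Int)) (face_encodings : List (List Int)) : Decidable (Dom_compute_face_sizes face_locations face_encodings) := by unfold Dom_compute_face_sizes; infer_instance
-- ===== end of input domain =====

-- B builds the sizes list with a comprehension and then picks the winner in a separate max/index step,
-- instead of A's single loop that threads a running maximum; objective: simpler decomposition (same cost).

-- size of the face box (top, right, bottom, left) at index i: (bottom - top) * (right - left)
def pvSizeAt (locs : List (Int × Int × Int × Int)) (i : Int) : Int :=
  let tup := PySem.List.pyGetD locs i (0, 0, 0, 0)
  (tup.2.2.1 - tup.1) * (tup.2.1 - tup.2.2.2)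

-- ===== PORT A =====
-- the for-loop over enumerate(face_encodings), threading (face_sizes, max_face_size, closest_face_idx)
def pvGoA (locs : List (Int × Int × Int × Int)) :
    List (Int × List Int) → List Int → Int → Option Int → List Int × Option Int
  | [], sizes, _, closest => (sizes, closest)
  | (i, _) :: rest, sizes, mx, closest =>
    let size := pvSizeAt locs i
    if size > mx then pvGoA locs rest (sizes ++ [size]) size (some i)
    else pvGoA locs rest (sizes ++ [size]) mx closest

def compute_face_sizes (face_locations : List (Int × Int × Int × Int)) (face_encodings : List (List Int)) : List Int × Option Int :=
  pvGoA face_locations (PySem.List.enumerate face_encodings 0) [] 0 none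

-- ===== PORT B =====
def compute_face_sizes_alt (face_locations : List (Int × Int × Int × Int)) (face_encodings : List (List Int)) : List Int × Option Int :=
  let face_sizes := (PySem.List.pyRange 0 (PySem.List.len face_encodings) 1).map (pvSizeAt face_locations)
  let closest : Option Int :=
    match PySem.List.max? face_sizes (fun y => y) with
    | none => none
    | some m => if m > 0 then Option.map (fun k : Nat => (k : Int)) (PySem.List.index? face_sizes m) else none
  (face_sizes, closest)

-- ===== PRECONDITION & SPEC =====
-- Pre_ excludes exactly the inputs where face_encodings is longer than face_locations: there
-- face_locations[i] raises IndexError in A (and in B alike).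
def Pre_compute_face_sizes (face_locations : List (Int × Int × Int × Int)) (face_encodings : List (List Int)) : Prop :=
  face_encodings.length ≤ face_locations.length
instance (face_locations : List (Int × Int × Int × Int)) (face_encodings : List (List Int)) : Decidable (Pre_compute_face_sizes face_locations face_encodings) := by unfold Pre_compute_face_sizes; infer_instance

def pvWitness_compute_face_sizes : (List (Int × Int × Int × Int)) × List (List Int) :=
  ([(0, 4, 3, 1), (1, 5, 2, 2)], [[7], [8]])

def Spec_compute_face_sizes (face_locations : List (Int × Int × Int × Int)) (face_encodings : List (List Int)) (out : List Int × Option Int) : Prop := out = compute_face_sizes_alt face_locations face_encodings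
instance (face_locations : List (Int × Int × Int × Int)) (face_encodings : List (List Int)) (out : List Int × Option Int) : Decidable (Spec_compute_face_sizes face_locations face_encodings out) := by unfold Spec_compute_face_sizes; infer_instance

-- ===== CLAIM (what is proved, stated in full; the proofs are below) =====
def Claim_equal_compute_face_sizes : Prop := ∀ (face_locations : List (Int × Int × Int × Int)) (face_encodings : List (List Int)), Dom_compute_face_sizes face_locations face_encodings → Pre_compute_face_sizes face_locations face_encodings → Spec_compute_face_sizes face_locations face_encodings (compute_face_sizes face_locations face_encodings)

-- ===== LEMMAS AND PROOFS =====

-- the (max, argmax) part of A's loop, on the list of sizes alone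
def pvScan : List Int → Int → Int → Option Int → Int × Option Int
  | [], _, mx, c => (mx, c)
  | x :: xs, i, mx, c =>
    if x > mx then pvScan xs (i + 1) x (some i) else pvScan xs (i + 1) mx c

theorem pvGoA_eq_scan (locs : List (Int × Int × Int × Int)) :
    ∀ (xs : List (List Int)) (i : Int) (sizes : List Int) (mx : Int) (c : Option Int),
      pvGoA locs (PySem.List.enumerate xs i) sizes mx c =
        (sizes ++ (PySem.List.enumerate xs i).map (fun p => pvSizeAt locs p.1),
         (pvScan ((PySem.List.enumerate xs i).map (fun p => pvSizeAt locs p.1)) i mx c).2) := by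
  intro xs
  induction xs with
  | nil => intro i sizes mx c; simp [PySem.List.enumerate_nil, pvGoA, pvScan]
  | cons e rest ih =>
    intro i sizes mx c
    rw [PySem.List.enumerate_cons]
    simp only [pvGoA, List.map_cons, pvScan]
    by_cases h : pvSizeAt locs i > mx
    · simp only [if_pos h, ih]; simp
    · simp only [if_neg h, ih]; simp

theorem pvFoldl_max_max (a : Int) : ∀ (xs : List Int) (b : Int),
    xs.foldl max (max a b) = max a (xs.foldl max b) := by
  intro xs
  induction xs with
  | nil => simp
  | cons x xs ih => intro b; simp [List.foldl_cons, max_assoc, ih]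

theorem pvFoldl_max_mem : ∀ (xs : List Int) (mx : Int),
    xs.foldl max mx > mx → xs.foldl max mx ∈ xs := by
  intro xs
  induction xs with
  | nil => simp
  | cons x xs ih =>
    intro mx h
    rw [List.foldl_cons] at h ⊢
    by_cases hx : x > mx
    · rcases lt_or_eq_of_le (PySem.List.le_foldl_max xs (max mx x)).1 with h2 | h2
      · rw [max_eq_right hx.le] at h2 ⊢
        exact List.mem_cons_of_mem _ (ih x h2)
      · rw [max_eq_right hx.le] at h2 ⊢
        rw [← h2]; exact List.mem_cons_self
    · rw [max_eq_left (not_lt.mp hx)] at h ⊢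
      exact List.mem_cons_of_mem _ (ih mx h)

theorem pvScan_spec : ∀ (s : List Int) (i mx : Int) (c : Option Int),
    (pvScan s i mx c).2 =
      if s.foldl max mx > mx
      then Option.map (fun k : Nat => i + (k : Int)) (PySem.List.index? s (s.foldl max mx))
      else c := by
  intro s
  induction s with
  | nil => intro i mx c; simp [pvScan]
  | cons x xs ih =>
    intro i mx c
    rw [List.foldl_cons]
    simp only [pvScan]
    by_cases hx : x > mx
    · rw [if_pos hx, ih]
      rw [max_eq_right hx.le]
      have hMx : x ≤ xs.foldl max x := (PySem.List.le_foldl_max xs x).1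
      have hcond : xs.foldl max x > mx := lt_of_lt_of_le hx hMx
      rw [if_pos hcond]
      rcases lt_or_eq_of_le hMx with h2 | h2
      · rw [if_pos h2]
        have hmem : xs.foldl max x ∈ xs := pvFoldl_max_mem xs x h2
        rw [PySem.List.index?_cons_of_ne xs (by omega : x ≠ xs.foldl max x)]
        obtain ⟨k, hk⟩ := Option.isSome_iff_exists.mp
          ((PySem.List.index?_isSome_iff xs (xs.foldl max x)).mpr hmem)
        rw [hk]
        simp only [Option.map_some]
        congr 1
        push_cast
        ring
      · rw [if_neg (by omega)]
        rw [← h2, PySem.List.index?_cons_self]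
        simp
    · rw [if_neg hx, ih]
      rw [max_eq_left (not_lt.mp hx)]
      by_cases hc : xs.foldl max mx > mx
      · rw [if_pos hc, if_pos hc]
        rw [PySem.List.index?_cons_of_ne xs (by omega : x ≠ xs.foldl max mx)]
        obtain ⟨k, hk⟩ := Option.isSome_iff_exists.mp
          ((PySem.List.index?_isSome_iff xs (xs.foldl max mx)).mpr (pvFoldl_max_mem xs mx hc))
        rw [hk]
        simp only [Option.map_some]
        congr 1
        push_cast
        ring
      · rw [if_neg hc, if_neg hc]

-- sizes list of A equals B's comprehension
theorem pvSizes_eq (locs : List (Int × Int × Int × Int)) (encs : List (List Int)) :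
    (PySem.List.enumerate encs 0).map (fun p => pvSizeAt locs p.1) =
      (PySem.List.pyRange 0 (PySem.List.len encs) 1).map (pvSizeAt locs) := by
  have h := PySem.List.map_fst_enumerate encs 0
  rw [zero_add] at h
  rw [PySem.List.len_eq, ← h, List.map_map]
  rfl

-- ===== VERDICT (by name: the statement is the Claim_ definition above) =====
theorem compute_face_sizes_spec : Claim_equal_compute_face_sizes := by
  intro locs encs _ _
  unfold Spec_compute_face_sizes
  unfold compute_face_sizes compute_face_sizes_alt
  rw [pvGoA_eq_scan, pvScan_spec, pvSizes_eq]
  simp only [List.nil_append]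
  cases hs : (PySem.List.pyRange 0 (PySem.List.len encs) 1).map (pvSizeAt locs) with
  | nil => simp [PySem.List.max?]
  | cons x xs =>
    rw [PySem.List.max?_id_cons]
    dsimp only
    rw [List.foldl_cons, pvFoldl_max_max]
    by_cases hm : xs.foldl max x > 0
    · have h0 : max 0 (xs.foldl max x) = xs.foldl max x := max_eq_right hm.le
      rw [h0, if_pos hm, if_pos hm]
      simp
    · have h0 : max 0 (xs.foldl max x) = 0 := max_eq_left (not_lt.mp hm)
      rw [h0, if_neg (lt_irrefl 0), if_neg hm]
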